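-- pv_equiv track=rewrite | github.com/Narwhail/t-word | prog/clustering_algorithms.py | _create_cluster_dict
-- ===== SOURCE A (Python) =====
-- def _create_cluster_dict(data, medoid_indices, assignments):
--     """
--     Helper to create the dictionary structure required for plotting.
--     """
--     medoid_data = [data[i] for i in medoid_indices]
--     medoid_ids = [m['id'] for m in medoid_data]
--     clusters = {mid: [] for mid in medoid_ids}
--
--     for point_idx, assignment_idx in enumerate(assignments):
--         assigned_medoid_id = medoid_ids[assignment_idx]
--         clusters[assigned_medoid_id].append(data[point_idx])
--
--     return clusters, medoid_data
-- ===== SOURCE B (Python) =====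
-- def _members(data, medoid_ids, assignments, mid):
--     """All points (in point order) assigned to the medoid with id `mid`."""
--     members = []
--     for point_idx, assignment_idx in enumerate(assignments):
--         if medoid_ids[assignment_idx] == mid:
--             members.append(data[point_idx])
--     return members
--
--
-- def _create_cluster_dict(data, medoid_indices, assignments):
--     """
--     Build each cluster independently: dedup the medoid ids in first-occurrence
--     order, then collect each cluster with a separate scan of the assignments.
--     """
--     medoid_data = [data[i] for i in medoid_indices]
--     medoid_ids = [m['id'] for m in medoid_data]
--     clusters = {mid: _members(data, medoid_ids, assignments, mid)
--                 for mid in dict.fromkeys(medoid_ids)}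
--     return clusters, medoid_data
-- ===== Notes on version B (the rewrite author's own statement) =====
-- stated objective: alternative
-- what changed: Replaces A's initialize-empty-dict-then-one-pass-append loop by deduplicating the medoid ids and building each cluster independently with a recursive per-medoid scan of the assignments (k independent scans, no dict mutation).
import Mathlib
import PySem

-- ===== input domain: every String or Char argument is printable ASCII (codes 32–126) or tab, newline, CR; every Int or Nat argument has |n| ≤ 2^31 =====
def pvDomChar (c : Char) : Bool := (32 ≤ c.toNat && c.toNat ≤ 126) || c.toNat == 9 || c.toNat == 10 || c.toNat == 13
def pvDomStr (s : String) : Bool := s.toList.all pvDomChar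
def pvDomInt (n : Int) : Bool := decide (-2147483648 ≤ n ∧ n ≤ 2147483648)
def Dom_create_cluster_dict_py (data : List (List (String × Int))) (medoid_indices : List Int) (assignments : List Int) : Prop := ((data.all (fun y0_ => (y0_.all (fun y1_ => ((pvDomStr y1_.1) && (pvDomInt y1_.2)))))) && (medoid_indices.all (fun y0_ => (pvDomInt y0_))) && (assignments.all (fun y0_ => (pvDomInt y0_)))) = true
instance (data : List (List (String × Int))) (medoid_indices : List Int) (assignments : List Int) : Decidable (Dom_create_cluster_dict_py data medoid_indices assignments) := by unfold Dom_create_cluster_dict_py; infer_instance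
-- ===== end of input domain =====

-- B replaces A's initialize-then-single-pass-append grouping loop by deduplicating the medoid
-- ids and collecting each cluster with an independent recursive scan (alternative decomposition).


-- ===== PORT A =====
def create_cluster_dict_py (data : List (List (String × Int))) (medoid_indices : List Int) (assignments : List Int) : (List (Int × List (List (String × Int)))) × (List (List (String × Int))) :=
  let medoid_data := medoid_indices.map (fun i => PySem.List.pyGetD data i [])
  let medoid_ids := medoid_data.map (fun m => (PySem.Dict.mk m).getD "id" 0)
  let clusters0 : PySem.Dict Int (List (List (String × Int))) :=
    medoid_ids.foldl (fun d mid => d.insert mid []) PySem.Dict.empty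
  let clusters :=
    (PySem.List.enumerate assignments).foldl
      (fun d pa =>
        d.modify (PySem.List.pyGetD medoid_ids pa.2 0) []
          (· ++ [PySem.List.pyGetD data pa.1 []]))
      clusters0
  (clusters.items, medoid_data)

-- ===== PORT B =====
-- `_members`: the explicit loop over `enumerate(assignments)` becomes the obvious structural
-- recursion carrying the running point index `p`, consing matches in point order.
def pvMembers (data : List (List (String × Int))) (medoid_ids : List Int) (mid : Int) :
    List Int → Int → List (List (String × Int))
  | [], _ => []
  | a :: rest, p =>
    if PySem.List.pyGetD medoid_ids a 0 == mid then
      PySem.List.pyGetD data p [] :: pvMembers data medoid_ids mid rest (p + 1)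
    else
      pvMembers data medoid_ids mid rest (p + 1)

-- the dict comprehension ranges over the already-distinct keys `dict.fromkeys(medoid_ids)`
-- (= PySem.List.dedup), so the resulting dict IS the association list of pairs in that order.
def create_cluster_dict_py_alt (data : List (List (String × Int))) (medoid_indices : List Int) (assignments : List Int) : (List (Int × List (List (String × Int)))) × (List (List (String × Int))) :=
  let medoid_data := medoid_indices.map (fun i => PySem.List.pyGetD data i [])
  let medoid_ids := medoid_data.map (fun m => (PySem.Dict.mk m).getD "id" 0)
  let clusters :=
    (PySem.List.dedup medoid_ids).map
      (fun mid => (mid, pvMembers data medoid_ids mid assignments 0))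
  (clusters, medoid_data)

-- ===== PRECONDITION & SPEC =====
-- Pre_ is exactly where Python A returns: every medoid index in range, every medoid row has an
-- 'id' key, every assignment indexes a medoid, and every enumerated point indexes data.
def Pre_create_cluster_dict_py (data : List (List (String × Int))) (medoid_indices : List Int) (assignments : List Int) : Prop :=
  (∀ i ∈ medoid_indices, PySem.Raise.InRange data.length i) ∧
  (∀ i ∈ medoid_indices, "id" ∈ (PySem.List.pyGetD data i []).map Prod.fst) ∧
  assignments.length ≤ data.length ∧
  (∀ a ∈ assignments, PySem.Raise.InRange medoid_indices.length a)
instance (data : List (List (String × Int))) (medoid_indices : List Int) (assignments : List Int) : Decidable (Pre_create_cluster_dict_py data medoid_indices assignments) := by unfold Pre_create_cluster_dict_py; infer_instance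

def pvWitness_create_cluster_dict_py : (List (List (String × Int))) × List Int × List Int :=
  ([[("id", 1)], [("id", 2)], [("id", 3)]], [0, 2], [1, 0, 1])

def Spec_create_cluster_dict_py (data : List (List (String × Int))) (medoid_indices : List Int) (assignments : List Int) (out : (List (Int × List (List (String × Int)))) × (List (List (String × Int)))) : Prop := out = create_cluster_dict_py_alt data medoid_indices assignments
instance (data : List (List (String × Int))) (medoid_indices : List Int) (assignments : List Int) (out : (List (Int × List (List (String × Int)))) × (List (List (String × Int)))) : Decidable (Spec_create_cluster_dict_py data medoid_indices assignments out) := by unfold Spec_create_cluster_dict_py; infer_instance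

-- ===== CLAIM (what is proved, stated in full; the proofs are below) =====
def Claim_equal_create_cluster_dict_py : Prop := ∀ (data : List (List (String × Int))) (medoid_indices : List Int) (assignments : List Int), Dom_create_cluster_dict_py data medoid_indices assignments → Pre_create_cluster_dict_py data medoid_indices assignments → Spec_create_cluster_dict_py data medoid_indices assignments (create_cluster_dict_py data medoid_indices assignments)

-- ===== LEMMAS AND PROOFS =====

-- PySem.Set.update adds nothing when every element is already present.
theorem pv_set_update_absorb (l : List Int) :
    ∀ s : PySem.Set Int, (∀ x ∈ l, x ∈ s) → PySem.Set.update s l = s := by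
  induction l with
  | nil => intro s _; rfl
  | cons x t ih =>
    intro s h
    have hx : x ∈ s := h x (List.mem_cons_self ..)
    have hadd : PySem.Set.add s x = s := by
      simp [PySem.Set.add, PySem.Set.contains, hx]
    calc PySem.Set.update s (x :: t)
        = PySem.Set.update (PySem.Set.add s x) t := rfl
      _ = s := by rw [hadd]; exact ih s (fun y hy => h y (List.mem_cons_of_mem _ hy))

-- getD through A's modify-append loop, with key/value projections of the loop variable.
theorem pv_getD_modify_append_loop {V : Type} (key : Int × Int → Int) (val : Int × Int → V)
    (l : List (Int × Int)) (d : PySem.Dict Int (List V)) (c : Int) :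
    (l.foldl (fun d pa => d.modify (key pa) [] (· ++ [val pa])) d).getD c []
      = d.getD c [] ++ (l.filter (fun pa => key pa == c)).map val := by
  have h : l.foldl (fun d pa => d.modify (key pa) [] (· ++ [val pa])) d
      = (l.map (fun pa => (key pa, val pa))).foldl
          (fun d p => d.modify p.1 [] (· ++ [p.2])) d := by
    rw [List.foldl_map]
  rw [h, PySem.Dict.getD_foldl_modify_append, List.filter_map, List.map_map]
  rfl

-- getD through an insert-fold whose value is a function of the key.
theorem pv_getD_foldl_insert_fn {V : Type} (g : Int → V) (dflt : V) (ids : List Int) (c : Int) :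
    ∀ d : PySem.Dict Int V,
      (ids.foldl (fun d mid => d.insert mid (g mid)) d).getD c dflt
        = if c ∈ ids then g c else d.getD c dflt := by
  induction ids with
  | nil => intro d; simp
  | cons mid t ih =>
    intro d
    simp only [List.foldl_cons, ih, PySem.Dict.getD_insert, List.mem_cons]
    by_cases hct : c ∈ t
    · simp [hct]
    · by_cases hcm : c = mid <;> simp [hct, hcm]
-- B's collector equals the filtered-scan expression used to characterise A's dict.
theorem pv_members_eq (data : List (List (String × Int))) (ids : List Int)
    (mid : Int) (asn : List Int) :
    ∀ p : Int,
      pvMembers data ids mid asn p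
        = ((PySem.List.enumerate asn p).filter
              (fun pa => PySem.List.pyGetD ids pa.2 0 == mid)).map
            (fun pa => PySem.List.pyGetD data pa.1 []) := by
  induction asn with
  | nil => intro p; simp [pvMembers, PySem.List.enumerate_nil]
  | cons a t ih =>
    intro p
    rw [PySem.List.enumerate_cons]
    by_cases h : PySem.List.pyGetD ids a 0 == mid
    · simp [pvMembers, h, ih]
    · simp [pvMembers, h, ih]

-- ===== VERDICT (by name: the statement is the Claim_ definition above) =====
theorem create_cluster_dict_py_spec : Claim_equal_create_cluster_dict_py := by
  intro data med asn _ hpre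
  obtain ⟨hmed, _hid, _hlen, hasn⟩ := hpre
  unfold Spec_create_cluster_dict_py create_cluster_dict_py create_cluster_dict_py_alt
  simp only []
  set medoid_data := med.map (fun i => PySem.List.pyGetD data i []) with hmd
  set ids := medoid_data.map (fun m => (PySem.Dict.mk m).getD "id" 0) with hids
  set key : Int × Int → Int := fun pa => PySem.List.pyGetD ids pa.2 0 with hkey
  set val : Int × Int → List (String × Int) := fun pa => PySem.List.pyGetD data pa.1 [] with hval
  set enum := PySem.List.enumerate asn with henum
  set c0 : PySem.Dict Int (List (List (String × Int))) :=
    ids.foldl (fun d mid => d.insert mid []) PySem.Dict.empty with hc0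
  set dA := enum.foldl (fun d pa => d.modify (key pa) [] (· ++ [val pa])) c0 with hdA
  refine Prod.ext ?_ rfl
  -- every loop key lies in ids
  have hkeymem : ∀ pa ∈ enum, key pa ∈ ids := by
    intro pa hpa
    rcases (PySem.List.mem_enumerate_iff _ _ _).1 hpa with ⟨k, hk, rfl⟩
    have ha : asn[k] ∈ asn := List.getElem_mem hk
    have hrange : PySem.Raise.InRange ids.length asn[k] := by
      have : ids.length = med.length := by simp [hids, hmd]
      rw [this]; exact hasn _ ha
    exact PySem.List.pyGetD_mem _ _ hrange
  -- A's dict: keys are distinct and are exactly set(ids) in first-occurrence order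
  have hkeys0 : c0.keys = PySem.Set.ofList ids := by
    rw [hc0, PySem.Dict.keys_foldl_insert]
    rfl
  have hnodup0 : c0.keys.Nodup := by
    rw [hc0]
    exact PySem.Dict.nodup_keys_foldl_insert _ _ _ PySem.Dict.nodup_keys_empty
  have hkeysA : dA.keys = PySem.Set.ofList ids := by
    rw [hdA, PySem.Dict.keys_foldl_modify_key, hkeys0]
    refine pv_set_update_absorb _ _ ?_
    intro x hx
    rcases List.mem_map.1 hx with ⟨pa, hpa, rfl⟩
    exact (PySem.Set.mem_ofList _ _).2 (hkeymem pa hpa)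
  have hnodupA : dA.keys.Nodup := by
    rw [hdA]
    exact PySem.Dict.nodup_keys_foldl_modify_key _ _ _ _ _ hnodup0
  -- A's dict value at every key is the filtered scan
  have hgetA : ∀ c, dA.getD c [] = (enum.filter (fun pa => key pa == c)).map val := by
    intro c
    rw [hdA, pv_getD_modify_append_loop, hc0, pv_getD_foldl_insert_fn (g := fun _ => [])]
    split <;> simp
  -- items agree
  rw [PySem.Dict.items_eq_map_keys dA hnodupA [], hkeysA]
  rw [PySem.List.dedup_eq_ofList]
  refine List.map_congr_left ?_
  intro k _
  rw [hgetA k, pv_members_eq]
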